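-- pv_equiv track=rewrite | github.com/stefm78/learn-it | tmp/analyze_scope_alignment.py | collect_scope_nodes
-- ===== SOURCE A (Python) =====
-- from collections import Counter, defaultdict
-- from typing import Any
--
-- def collect_scope_nodes(node_by_id: dict[str, dict[str, Any]]) -> dict[str, list[str]]:
--     by_scope: dict[str, list[str]] = defaultdict(list)
--
--     for node_id, node in node_by_id.items():
--         scope = node.get("current_owner_scope")
--         if isinstance(scope, str) and scope:
--             by_scope[scope].append(node_id)
--
--     return {
--         scope: sorted(ids)
--         for scope, ids in sorted(by_scope.items())
--     }
-- ===== SOURCE B (Python) =====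
-- def collect_scope_nodes(node_by_id: dict[str, dict]) -> dict[str, list[str]]:
--     # Flatten to (scope, node_id) pairs, sort that flat list ONCE lexicographically,
--     # then cut it into runs of equal scope: no grouping dict and no per-group sort.
--     pairs = sorted(
--         (node.get("current_owner_scope"), node_id)
--         for node_id, node in node_by_id.items()
--         if isinstance(node.get("current_owner_scope"), str) and node.get("current_owner_scope")
--     )
--     result: dict[str, list[str]] = {}
--     i, n = 0, len(pairs)
--     while i < n:
--         scope = pairs[i][0]
--         j = i + 1
--         while j < n and pairs[j][0] == scope:
--             j += 1
--         result[scope] = [nid for _, nid in pairs[i:j]]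
--         i = j
--     return result
-- ===== Notes on version B (the rewrite author's own statement) =====
-- stated objective: alternative
-- what changed: A groups ids into a defaultdict in one pass and then sorts every group list and the scope keys; B uses no grouping dict at all: it flattens to a list of (scope, node_id) tuples, sorts that flat list once lexicographically, and cuts it into runs of equal scope with an index scan, so groups arise from adjacency and no per-group sort exists. Pre_ excludes only association lists with duplicate keys, which do not represent any Python dict.
import Mathlib
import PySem

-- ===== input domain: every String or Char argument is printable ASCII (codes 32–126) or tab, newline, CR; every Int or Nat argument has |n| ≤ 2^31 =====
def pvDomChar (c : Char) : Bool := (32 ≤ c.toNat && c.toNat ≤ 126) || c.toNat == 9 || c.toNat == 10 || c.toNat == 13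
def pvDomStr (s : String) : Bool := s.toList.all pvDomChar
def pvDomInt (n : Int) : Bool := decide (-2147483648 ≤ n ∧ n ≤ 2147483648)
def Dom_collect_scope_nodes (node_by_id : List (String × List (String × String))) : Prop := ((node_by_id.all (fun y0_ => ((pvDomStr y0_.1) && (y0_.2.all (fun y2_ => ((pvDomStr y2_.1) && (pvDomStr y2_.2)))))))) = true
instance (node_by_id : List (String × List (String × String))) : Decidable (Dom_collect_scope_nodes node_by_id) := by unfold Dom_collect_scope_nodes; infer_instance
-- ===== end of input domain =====

-- B drops A's grouping dict entirely: it flattens to (scope, node_id) pairs, sorts that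
-- flat list once lexicographically, and cuts it into runs of equal scope, so groups come
-- from adjacency and there is no per-group sort; alternative algorithm, same cost class.

-- node.get("current_owner_scope"), shared by both ports (both Pythons compute it identically)
def pvScope? (node : List (String × String)) : Option String :=
  (PySem.Dict.mk node).get? "current_owner_scope"

-- ===== PORT A =====
-- 'isinstance(scope, str)' is always true under the type convention (all values are strings),
-- so the guard is 'scope' nonempty. sorted(by_scope.items()) compares (key, value) tuples,
-- but dict keys are unique, so the key alone decides: ported as a sort by key.
def collect_scope_nodes (node_by_id : List (String × List (String × String))) : List (String × List String) :=
  let by_scope : PySem.Dict String (List String) :=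
    node_by_id.foldl (fun d q =>
      match pvScope? q.2 with
      | some scope => if scope ≠ "" then d.modify scope [] (· ++ [q.1]) else d
      | none => d) PySem.Dict.empty
  (PySem.List.sorted by_scope.items (fun kv => kv.1) false).map
    (fun kv => (kv.1, PySem.List.sorted kv.2 (fun x => x) false))

-- ===== PORT B =====
-- the generator expression of Source B: the (scope, node_id) tuples that pass the filter, in order
def pvPairsB (node_by_id : List (String × List (String × String))) : List (String × String) :=
  node_by_id.filterMap (fun q =>
    match pvScope? q.2 with
    | some scope => if scope ≠ "" then some (scope, q.1) else none
    | none => none)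

-- Source B's two nested while loops: cut the (sorted) pair list into runs of equal scope;
-- the inner 'while pairs[j][0] == scope' is the takeWhile/dropWhile split of the tail.
-- Source B writes each run into 'result' in run order, i.e. appends (scope, ids) pairs.
def pvRunSplit : List (String × String) → List (String × List String)
  | [] => []
  | p :: t =>
      (p.1, p.2 :: (t.takeWhile (fun q => q.1 == p.1)).map Prod.snd)
        :: pvRunSplit (t.dropWhile (fun q => q.1 == p.1))
termination_by l => l.length
decreasing_by
  exact Nat.lt_succ_of_le (List.Sublist.length_le (List.dropWhile_sublist _))

-- sorted(...) on (str, str) tuples is Python's lexicographic tuple sort: PySem.List.sorted2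
def collect_scope_nodes_alt (node_by_id : List (String × List (String × String))) : List (String × List String) :=
  pvRunSplit (PySem.List.sorted2 (pvPairsB node_by_id) Prod.fst Prod.snd false)

-- ===== PRECONDITION & SPEC =====
-- Pre_ excludes association lists with duplicate keys (in node_by_id or inside a node):
-- a Python dict cannot contain duplicates, so behaviour on such lists is only an accident
-- of the list encoding (Python's dict() keeps the last value, the ports read the list as given).
def Pre_collect_scope_nodes (node_by_id : List (String × List (String × String))) : Prop :=
  (node_by_id.map Prod.fst).Nodup ∧ ∀ p ∈ node_by_id, (p.2.map Prod.fst).Nodup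
instance (node_by_id : List (String × List (String × String))) : Decidable (Pre_collect_scope_nodes node_by_id) := by unfold Pre_collect_scope_nodes; infer_instance

def pvWitness_collect_scope_nodes : (List (String × List (String × String))) :=
  [("a", [("current_owner_scope", "s")]), ("b", [("x", "y")])]

def Spec_collect_scope_nodes (node_by_id : List (String × List (String × String))) (out : List (String × List String)) : Prop := out = collect_scope_nodes_alt node_by_id
instance (node_by_id : List (String × List (String × String))) (out : List (String × List String)) : Decidable (Spec_collect_scope_nodes node_by_id out) := by unfold Spec_collect_scope_nodes; infer_instance

-- ===== CLAIM (what is proved, stated in full; the proofs are below) =====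
def Claim_equal_collect_scope_nodes : Prop := ∀ (node_by_id : List (String × List (String × String))), Dom_collect_scope_nodes node_by_id → Pre_collect_scope_nodes node_by_id → Spec_collect_scope_nodes node_by_id (collect_scope_nodes node_by_id)

-- ===== LEMMAS AND PROOFS =====

-- A's loop body, abstracted
def pvStep (d : PySem.Dict String (List String)) (q : String × List (String × String)) :
    PySem.Dict String (List String) :=
  match pvScope? q.2 with
  | some scope => if scope ≠ "" then d.modify scope [] (· ++ [q.1]) else d
  | none => d

theorem pvFoldl_eq (xs : List (String × List (String × String)))
    (d : PySem.Dict String (List String)) :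
    xs.foldl pvStep d
      = (pvPairsB xs).foldl (fun d p => d.modify p.1 [] (· ++ [p.2])) d := by
  induction xs generalizing d with
  | nil => rfl
  | cons q t ih =>
      simp only [pvPairsB, List.filterMap_cons, List.foldl_cons, pvStep]
      cases h : pvScope? q.2 with
      | none => simpa [pvPairsB] using ih d
      | some s =>
          by_cases hs : s ≠ "" <;>
            simp [hs, pvPairsB, ih]

theorem pvGroups_getD (xs : List (String × List (String × String))) (s : String) :
    (xs.foldl pvStep PySem.Dict.empty).getD s []
      = ((pvPairsB xs).filter (fun p => p.1 == s)).map (·.2) := by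
  rw [pvFoldl_eq]
  simp [PySem.Dict.getD_foldl_modify_append]

theorem pvGroups_keys (xs : List (String × List (String × String))) :
    (xs.foldl pvStep PySem.Dict.empty).keys
      = PySem.Set.ofList ((pvPairsB xs).map Prod.fst) := by
  rw [pvFoldl_eq]
  rw [PySem.Dict.keys_foldl_modify_key (key := Prod.fst) (f := fun _ p => (· ++ [p.2]))]
  simp [PySem.Set.update_nil_left]

theorem pvGroups_keys_nodup (xs : List (String × List (String × String))) :
    (xs.foldl pvStep PySem.Dict.empty).keys.Nodup := by
  rw [pvGroups_keys]; exact PySem.Set.nodup_ofList _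

-- the boolean strict lexicographic order sorted2 sorts by
def pvLexLt (a b : String × String) : Bool :=
  decide (a.1 < b.1) || (!decide (b.1 < a.1) && decide (a.2 < b.2))

-- its (propositional) non-strict companion
def pvLe (a b : String × String) : Prop := a.1 < b.1 ∨ (a.1 = b.1 ∧ a.2 ≤ b.2)

theorem pvLexLt_false (a b : String × String) : pvLexLt a b = false ↔ pvLe b a := by
  simp only [pvLexLt, pvLe, Bool.or_eq_false_iff, Bool.and_eq_false_iff, Bool.not_eq_false',
    decide_eq_false_iff_not, decide_eq_true_eq, not_lt]
  constructor
  · rintro ⟨h1, h2 | h2⟩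
    · exact Or.inl h2
    · rcases lt_or_eq_of_le h1 with h | h
      · exact Or.inl h
      · exact Or.inr ⟨h, h2⟩
  · rintro (h | ⟨h1, h2⟩)
    · exact ⟨le_of_lt h, Or.inl h⟩
    · exact ⟨le_of_eq h1, Or.inr h2⟩

theorem pvLe_trans {a b c : String × String} (h1 : pvLe a b) (h2 : pvLe b c) : pvLe a c := by
  rcases h1 with h1 | ⟨h1, h1'⟩ <;> rcases h2 with h2 | ⟨h2, h2'⟩
  · exact Or.inl (lt_trans h1 h2)
  · exact Or.inl (h2 ▸ h1)
  · exact Or.inl (h1 ▸ h2)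
  · exact Or.inr ⟨h1.trans h2, h1'.trans h2'⟩

theorem pvLe_total (a b : String × String) : pvLe a b ∨ pvLe b a := by
  rcases lt_trichotomy a.1 b.1 with h | h | h
  · exact Or.inl (Or.inl h)
  · rcases le_total a.2 b.2 with h2 | h2
    · exact Or.inl (Or.inr ⟨h, h2⟩)
    · exact Or.inr (Or.inr ⟨h.symm, h2⟩)
  · exact Or.inr (Or.inl h)

theorem pvLexLt_asym {a b : String × String} (h : pvLexLt a b = true) : pvLexLt b a = false := by
  rcases pvLe_total a b with hle | hle
  · exact (pvLexLt_false b a).mpr hle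
  · exact absurd ((pvLexLt_false a b).mpr hle) (by simp [h])

theorem pvPairwise_insertBy (x : String × String) (acc : List (String × String))
    (h : acc.Pairwise (fun a b => pvLexLt b a = false)) :
    (PySem.List.insertBy pvLexLt x acc).Pairwise (fun a b => pvLexLt b a = false) := by
  induction acc with
  | nil => simp [PySem.List.insertBy]
  | cons y ys ih =>
      rw [List.pairwise_cons] at h
      obtain ⟨hy, hys⟩ := h
      by_cases hb : pvLexLt x y = true
      · rw [show PySem.List.insertBy pvLexLt x (y :: ys) = x :: y :: ys from by
          simp [PySem.List.insertBy, hb]]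
        refine List.pairwise_cons.mpr ⟨?_, List.pairwise_cons.mpr ⟨hy, hys⟩⟩
        intro z hz
        rcases List.mem_cons.mp hz with rfl | hz
        · exact pvLexLt_asym hb
        · exact (pvLexLt_false z x).mpr
            (pvLe_trans ((pvLexLt_false y x).mp (pvLexLt_asym hb))
              ((pvLexLt_false z y).mp (hy z hz)))
      · rw [show PySem.List.insertBy pvLexLt x (y :: ys) = y :: PySem.List.insertBy pvLexLt x ys from by
          simp [PySem.List.insertBy, hb]]
        refine List.pairwise_cons.mpr ⟨?_, ih hys⟩
        intro z hz
        rcases (PySem.List.mem_insertBy pvLexLt x z ys).mp hz with rfl | hz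
        · exact Bool.eq_false_iff.mpr hb
        · exact hy z hz

theorem pvPairwise_sorted2 (P : List (String × String)) :
    (PySem.List.sorted2 P Prod.fst Prod.snd false).Pairwise (fun a b => pvLexLt b a = false) := by
  have hrw : PySem.List.sorted2 P Prod.fst Prod.snd false
      = P.foldl (fun acc x => PySem.List.insertBy pvLexLt x acc) [] := rfl
  rw [hrw]
  have : ∀ (Q : List (String × String)) (acc : List (String × String)),
      acc.Pairwise (fun a b => pvLexLt b a = false) →
      (Q.foldl (fun acc x => PySem.List.insertBy pvLexLt x acc) acc).Pairwise
        (fun a b => pvLexLt b a = false) := by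
    intro Q
    induction Q with
    | nil => intro acc h; exact h
    | cons q t ih => intro acc h; exact ih _ (pvPairwise_insertBy q acc h)
  exact this P [] (by simp)

-- PySem.Set plumbing for the run-split characterisation
theorem pvFoldl_add_of_mem {α : Type} [BEq α] [LawfulBEq α] (ys : List α) (s : PySem.Set α)
    (h : ∀ y ∈ ys, y ∈ s) : ys.foldl PySem.Set.add s = s := by
  induction ys with
  | nil => rfl
  | cons y t ih =>
      have hy : PySem.Set.add s y = s := by
        simp [PySem.Set.add, PySem.Set.contains, h y (List.mem_cons_self ..)]
      rw [List.foldl_cons, hy]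
      exact ih (fun z hz => h z (List.mem_cons_of_mem _ hz))

theorem pvFoldl_add_cons {α : Type} [BEq α] [LawfulBEq α] (x : α) (s : List α) (zs : List α)
    (h : ∀ z ∈ zs, z ≠ x) :
    zs.foldl PySem.Set.add (x :: s) = x :: zs.foldl PySem.Set.add s := by
  induction zs generalizing s with
  | nil => rfl
  | cons z t ih =>
      have hzx : (z == x) = false := beq_eq_false_iff_ne.mpr (h z (List.mem_cons_self ..))
      have hrest : ∀ w ∈ t, w ≠ x := fun w hw => h w (List.mem_cons_of_mem _ hw)
      by_cases hc : PySem.Set.contains s z = true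
      · have h1 : PySem.Set.add (x :: s) z = x :: s := by
          simp [PySem.Set.add, PySem.Set.contains, hzx]
          simp [PySem.Set.contains] at hc
          simp [hc]
        have h2 : PySem.Set.add s z = s := by simp only [PySem.Set.add]; rw [if_pos hc]
        rw [List.foldl_cons, List.foldl_cons, h1, h2]
        exact ih s hrest
      · have h1 : PySem.Set.add (x :: s) z = x :: (s ++ [z]) := by
          simp [PySem.Set.add, PySem.Set.contains, hzx]
          simp [PySem.Set.contains] at hc
          simp [hc]
        have h2 : PySem.Set.add s z = s ++ [z] := by simp only [PySem.Set.add]; rw [if_neg hc]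
        rw [List.foldl_cons, List.foldl_cons, h1, h2]
        exact ih (s ++ [z]) hrest

theorem pvOfList_cons_split {α : Type} [BEq α] [LawfulBEq α] (x : α) (ys zs : List α)
    (hy : ∀ y ∈ ys, y = x) (hz : ∀ z ∈ zs, z ≠ x) :
    PySem.Set.ofList (x :: (ys ++ zs)) = x :: PySem.Set.ofList zs := by
  show List.foldl PySem.Set.add PySem.Set.empty (x :: (ys ++ zs)) = _
  rw [List.foldl_cons, List.foldl_append]
  have h0 : PySem.Set.add PySem.Set.empty x = [x] := rfl
  have h1 : ys.foldl PySem.Set.add [x] = [x] :=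
    pvFoldl_add_of_mem ys [x] (fun y hyy => by simp [hy y hyy])
  rw [h0, h1]
  exact pvFoldl_add_cons x [] zs hz

theorem pvFoldl_add_sublist {α : Type} [BEq α] (zs : List α) :
    ∀ (s : List α), ∃ ys, zs.foldl PySem.Set.add s = s ++ ys ∧ ys.Sublist zs := by
  induction zs with
  | nil => exact fun s => ⟨[], by simp⟩
  | cons z t ih =>
      intro s
      by_cases hc : PySem.Set.contains s z = true
      · obtain ⟨ys, h1, h2⟩ := ih s
        refine ⟨ys, ?_, h2.cons z⟩
        rw [List.foldl_cons, show PySem.Set.add s z = s from by simp only [PySem.Set.add]; rw [if_pos hc], h1]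
      · obtain ⟨ys, h1, h2⟩ := ih (s ++ [z])
        refine ⟨z :: ys, ?_, h2.cons₂ z⟩
        rw [List.foldl_cons, show PySem.Set.add s z = s ++ [z] from by simp only [PySem.Set.add]; rw [if_neg hc], h1]
        simp

theorem pvOfList_sublist {α : Type} [BEq α] (xs : List α) :
    (PySem.Set.ofList xs).Sublist xs := by
  obtain ⟨ys, h1, h2⟩ := pvFoldl_add_sublist xs ([] : List α)
  show List.foldl PySem.Set.add PySem.Set.empty xs |>.Sublist xs
  rw [show (PySem.Set.empty : PySem.Set α) = ([] : List α) from rfl, h1]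
  simpa using h2

theorem pvFst_dropWhile_gt (c : String) :
    ∀ (t : List (String × String)), (∀ q ∈ t, c ≤ q.1) →
      t.Pairwise (fun a b => a.1 ≤ b.1) →
      ∀ q ∈ t.dropWhile (fun p => p.1 == c), c < q.1 := by
  intro t
  induction t with
  | nil => intro _ _ q hq; simp [List.dropWhile] at hq
  | cons a t' ih =>
      intro hall hpw q hq
      rw [List.pairwise_cons] at hpw
      by_cases ha : (a.1 == c) = true
      · rw [List.dropWhile_cons_of_pos (by simpa using ha)] at hq
        exact ih (fun w hw => hall w (List.mem_cons_of_mem _ hw)) hpw.2 q hq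
      · rw [List.dropWhile_cons_of_neg (by simpa using ha)] at hq
        have hca : c < a.1 :=
          lt_of_le_of_ne (hall a (List.mem_cons_self ..))
            (fun h => ha (by simp [h.symm]))
        rcases List.mem_cons.mp hq with rfl | hq'
        · exact hca
        · exact lt_of_lt_of_le hca (hpw.1 q hq')

-- the run split of a list sorted by first component, characterised by filters
theorem pvRunSplit_eq (L : List (String × String))
    (h : L.Pairwise (fun a b => a.1 ≤ b.1)) :
    pvRunSplit L
      = (PySem.Set.ofList (L.map Prod.fst)).map
          (fun s => (s, (L.filter (fun p => p.1 == s)).map Prod.snd)) := by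
  induction L using pvRunSplit.induct with
  | case1 => simp [pvRunSplit]
  | case2 p t ih =>
      obtain ⟨hall, hpw⟩ := List.pairwise_cons.mp h
      have hu : ∀ q ∈ t.takeWhile (fun q => q.1 == p.1), q.1 = p.1 := by
        intro q hq
        have := List.mem_takeWhile_imp hq
        simpa using this
      have hv : ∀ q ∈ t.dropWhile (fun q => q.1 == p.1), p.1 < q.1 :=
        pvFst_dropWhile_gt p.1 t hall hpw
      have hvpw : (t.dropWhile (fun q => q.1 == p.1)).Pairwise (fun a b => a.1 ≤ b.1) :=
        hpw.sublist (List.dropWhile_sublist _)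
      have IH := ih hvpw
      have hsplit : t.takeWhile (fun q => q.1 == p.1) ++ t.dropWhile (fun q => q.1 == p.1) = t :=
        List.takeWhile_append_dropWhile
      have hmap : (p :: t).map Prod.fst
          = p.1 :: ((t.takeWhile (fun q => q.1 == p.1)).map Prod.fst
              ++ (t.dropWhile (fun q => q.1 == p.1)).map Prod.fst) := by
        rw [List.map_cons, ← List.map_append, hsplit]
      have hofl : PySem.Set.ofList ((p :: t).map Prod.fst)
          = p.1 :: PySem.Set.ofList ((t.dropWhile (fun q => q.1 == p.1)).map Prod.fst) := by
        rw [hmap]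
        refine pvOfList_cons_split _ _ _ ?_ ?_
        · intro y hy
          obtain ⟨q, hq, rfl⟩ := List.mem_map.mp hy
          exact hu q hq
        · intro z hz
          obtain ⟨q, hq, rfl⟩ := List.mem_map.mp hz
          exact ne_of_gt (hv q hq)
      have hfiltp : (p :: t).filter (fun q => q.1 == p.1)
          = p :: t.takeWhile (fun q => q.1 == p.1) := by
        rw [List.filter_cons_of_pos (by simp)]
        congr 1
        conv_lhs => rw [← hsplit]
        rw [List.filter_append,
          List.filter_eq_self.mpr (fun q hq => by simp [hu q hq]),
          List.filter_eq_nil_iff.mpr (fun q hq => by simp [ne_of_gt (hv q hq)]),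
          List.append_nil]
      rw [pvRunSplit, IH, hofl, List.map_cons]
      congr 1
      · rw [hfiltp]; rfl
      · refine List.map_congr_left ?_
        intro a ha
        have hmem : a ∈ (t.dropWhile (fun q => q.1 == p.1)).map Prod.fst :=
          (pvOfList_sublist _).mem ha
        obtain ⟨q, hq, rfl⟩ := List.mem_map.mp hmem
        have hne : p.1 ≠ q.1 := ne_of_lt (hv q hq)
        have hfilt : (p :: t).filter (fun w => w.1 == q.1)
            = (t.dropWhile (fun w => w.1 == p.1)).filter (fun w => w.1 == q.1) := by
          rw [List.filter_cons_of_neg (by simp [hne])]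
          conv_lhs => rw [← hsplit]
          rw [List.filter_append,
            List.filter_eq_nil_iff.mpr
              (fun w hw => by have h1 := hu w hw; simp [h1, hne]),
            List.nil_append]
        rw [hfilt]

-- ===== VERDICT (by name: the statement is the Claim_ definition above) =====
theorem collect_scope_nodes_spec : Claim_equal_collect_scope_nodes := by
  intro xs _ _
  show collect_scope_nodes xs = collect_scope_nodes_alt xs
  simp only [collect_scope_nodes, collect_scope_nodes_alt]
  rw [show (fun (d : PySem.Dict String (List String)) (q : String × List (String × String)) =>
      match pvScope? q.2 with
      | some scope => if scope ≠ "" then d.modify scope [] (· ++ [q.1]) else d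
      | none => d) = pvStep from rfl]
  set P := pvPairsB xs with hP
  set S := PySem.List.sorted2 P Prod.fst Prod.snd false with hS
  set G := xs.foldl pvStep PySem.Dict.empty with hG
  have hSperm : S.Perm P := PySem.List.sorted2_perm P Prod.fst Prod.snd false
  have hSpw : S.Pairwise (fun a b => pvLexLt b a = false) := pvPairwise_sorted2 P
  have hSfst : S.Pairwise (fun a b => a.1 ≤ b.1) := by
    refine hSpw.imp ?_
    intro a b hba
    rcases (pvLexLt_false b a).mp hba with h' | ⟨h', _⟩
    · exact le_of_lt h'
    · exact le_of_eq h'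
  rw [pvRunSplit_eq S hSfst]
  set KB := PySem.Set.ofList (S.map Prod.fst) with hKB
  have hkeys : G.keys = PySem.Set.ofList (P.map Prod.fst) := pvGroups_keys xs
  have hnd : G.keys.Nodup := pvGroups_keys_nodup xs
  have hKBnd : KB.Nodup := PySem.Set.nodup_ofList _
  have hKBle : KB.Pairwise (· ≤ ·) :=
    (List.pairwise_map.mpr hSfst).sublist (pvOfList_sublist _)
  have hKBlt : KB.Pairwise (· < ·) :=
    (hKBle.and hKBnd).imp (fun h => lt_of_le_of_ne h.1 h.2)
  have hKBperm : KB.Perm G.keys := by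
    refine (List.perm_ext_iff_of_nodup hKBnd hnd).mpr ?_
    intro a
    rw [hkeys]
    simp only [hKB, PySem.Set.mem_ofList]
    exact (hSperm.map Prod.fst).mem_iff
  have hitems : G.items = G.keys.map (fun k => (k, G.getD k [])) :=
    PySem.Dict.items_eq_map_keys G hnd []
  have hsortitems : PySem.List.sorted G.items (fun kv => kv.1) false
      = KB.map (fun k => (k, G.getD k [])) := by
    refine PySem.List.sorted_eq_of_perm_of_pairwise_lt _ _ _ ?_ ?_
    · rw [hitems]; exact hKBperm.map _
    · exact List.pairwise_map.mpr hKBlt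
  rw [hsortitems, List.map_map]
  refine List.map_congr_left ?_
  intro k hk
  simp only [Function.comp]
  have hval : PySem.List.sorted (G.getD k []) (fun x => x) false
      = (S.filter (fun p => p.1 == k)).map Prod.snd := by
    rw [hG, pvGroups_getD]
    refine PySem.List.sorted_id_eq_of_perm_of_pairwise _ _ ?_ ?_
    · exact (hSperm.filter _).map _
    · refine List.pairwise_map.mpr ?_
      refine (List.pairwise_filter).mpr (hSpw.imp ?_)
      intro a b hba h1 h2
      rcases (pvLexLt_false b a).mp hba with h' | ⟨_, h'⟩
      · have he : a.1 = b.1 := by rw [eq_of_beq h1, eq_of_beq h2]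
        exact absurd h' (by rw [he]; exact lt_irrefl _)
      · exact h'
  rw [hval]
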